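-- pv_equiv track=rewrite | github.com/Poseidonst/Enigma | Teije/Attempts after Holidays/Crack Enigma/Crack Enigma After Concept Version/FastestVersionCracking.py | freq
-- ===== SOURCE A (Python) =====
-- def freq(message, cipher):
--     outputdict = {}
--     for i in message + cipher:
--         if i not in outputdict:
--             outputdict[i] = 1
--         else:
--             outputdict[i] += 1
--
--     outputlist = []
--     maximum = max(outputdict.values())
--     for i in outputdict.items():
--         if i[1] == maximum:
--             outputlist.append(i[0])
--     if maximum > 1:
--         for i in outputdict.items():
--             if i[1] == maximum - 1:
--                 outputlist.append(i[0])
--     if maximum > 2: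
--         for i in outputdict.items():
--             if i[1] == maximum - 2:
--                 outputlist.append(i[0])
--     if maximum > 3:
--         for i in outputdict.items():
--             if i[1] == maximum - 3:
--                 outputlist.append(i[0])
--     if maximum > 4:
--         for i in outputdict.items():
--             if i[1] == maximum - 4:
--                 outputlist.append(i[0])
--     if maximum > 5:
--         for i in outputdict.items():
--             if i[1] == maximum - 5:
--                 outputlist.append(i[0])
--     if maximum > 6:
--         for i in outputdict.items():
--             if i[1] == maximum - 6:
--                 outputlist.append(i[0])
--
--     defoutputlist = []
--     for output in outputlist:
--         for i in range(len(message)):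
--             if message[i] == output and i not in defoutputlist:
--                 defoutputlist.append(i)
--             elif cipher[i] == output and i not in defoutputlist:
--                 defoutputlist.append(i)
--     return(defoutputlist)
-- ===== SOURCE B (Python) =====
-- def freq(message, cipher):
--     counts = {}
--     for ch in message + cipher:
--         counts[ch] = counts.get(ch, 0) + 1
--     maximum = max(counts.values())
--
--     # one stable sort by descending frequency + one filter replaces the
--     # seven unrolled guarded tier scans
--     ranked = sorted(counts.items(), key=lambda kv: -kv[1])
--     outputlist = [ch for ch, n in ranked if n >= maximum - 6]
--
--     # inverted positional index built in one sweep: char -> ascending positions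
--     pos = {}
--     for i in range(len(message)):
--         pos.setdefault(message[i], []).append(i)
--         if cipher[i] != message[i]:
--             pos.setdefault(cipher[i], []).append(i)
--
--     seen = set()
--     defoutputlist = []
--     for output in outputlist:
--         for i in pos.get(output, ()):
--             if i not in seen:
--                 seen.add(i)
--                 defoutputlist.append(i)
--     return defoutputlist
-- ===== Notes on version B (the rewrite author's own statement) =====
-- stated objective: faster
-- what changed: Phase 1's seven unrolled guarded tier scans become one stable sort of the items by descending frequency plus a single >= maximum-6 filter, and phase 2's repeated full-index rescans with O(n) list-membership dedup become a char->positions inverted index built in one sweep, consulted per kept char with an O(1) seen-set.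
-- outside the precondition, e.g. on freq('aa', ''): A returns [0, 1], B raises IndexError
import Mathlib
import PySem

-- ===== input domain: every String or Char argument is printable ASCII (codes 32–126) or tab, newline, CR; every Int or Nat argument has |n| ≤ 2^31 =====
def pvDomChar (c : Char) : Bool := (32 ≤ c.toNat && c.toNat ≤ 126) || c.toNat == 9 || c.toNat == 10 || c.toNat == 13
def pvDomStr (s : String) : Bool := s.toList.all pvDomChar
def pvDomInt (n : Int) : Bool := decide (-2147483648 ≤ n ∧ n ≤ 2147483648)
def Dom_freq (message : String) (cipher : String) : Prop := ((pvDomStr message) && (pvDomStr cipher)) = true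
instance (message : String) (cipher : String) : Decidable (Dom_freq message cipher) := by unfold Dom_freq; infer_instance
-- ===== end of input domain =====

-- B replaces A's seven unrolled frequency-tier scans by one stable sort of the counts by
-- descending frequency plus a single filter, and replaces A's per-character full index
-- rescans by a char→positions inverted index built in one sweep with a seen set for dedup.

-- ===== PORT A =====
def freq (message : String) (cipher : String) : List Int :=
  let s := message.toList ++ cipher.toList
  let outputdict := s.foldl
    (fun d c => if d.contains c then d.insert c (d.getD c 0 + 1) else d.insert c 1)
    (PySem.Dict.empty : PySem.Dict Char Int)
  match PySem.List.max? outputdict.values (fun v => v) with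
  | none => []   -- Python: max() raises ValueError here (excluded by Pre_)
  | some maximum =>
    let l1 := outputdict.items.foldl
      (fun acc p => if p.2 == maximum then acc ++ [p.1] else acc) []
    let l2 := if maximum > 1 then outputdict.items.foldl
      (fun acc p => if p.2 == maximum - 1 then acc ++ [p.1] else acc) l1 else l1
    let l3 := if maximum > 2 then outputdict.items.foldl
      (fun acc p => if p.2 == maximum - 2 then acc ++ [p.1] else acc) l2 else l2
    let l4 := if maximum > 3 then outputdict.items.foldl
      (fun acc p => if p.2 == maximum - 3 then acc ++ [p.1] else acc) l3 else l3
    let l5 := if maximum > 4 then outputdict.items.foldl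
      (fun acc p => if p.2 == maximum - 4 then acc ++ [p.1] else acc) l4 else l4
    let l6 := if maximum > 5 then outputdict.items.foldl
      (fun acc p => if p.2 == maximum - 5 then acc ++ [p.1] else acc) l5 else l5
    let outputlist := if maximum > 6 then outputdict.items.foldl
      (fun acc p => if p.2 == maximum - 6 then acc ++ [p.1] else acc) l6 else l6
    let msgL := message.toList
    let cipL := cipher.toList
    -- cipher[i] can raise IndexError in Python; Pre_ guarantees the index is in range
    outputlist.foldl (fun acc output =>
      (PySem.List.pyRange 0 (msgL.length : Int) 1).foldl (fun acc2 i =>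
        if (PySem.List.pyGetD msgL i ' ' == output) && !(acc2.contains i) then acc2 ++ [i]
        else if (PySem.List.pyGetD cipL i ' ' == output) && !(acc2.contains i) then acc2 ++ [i]
        else acc2) acc) []

-- ===== PORT B =====
def freq_alt (message : String) (cipher : String) : List Int :=
  let msgL := message.toList
  let cipL := cipher.toList
  let counts := (msgL ++ cipL).foldl
    (fun d c => d.insert c (d.getD c 0 + 1)) (PySem.Dict.empty : PySem.Dict Char Int)
  match PySem.List.max? counts.values (fun v => v) with
  | none => []   -- Python: max() raises ValueError here (excluded by Pre_)
  | some maximum =>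
    let ranked := PySem.List.sorted counts.items (fun kv => -kv.2) false
    let outputlist := ranked.foldl
      (fun acc kv => if maximum - 6 ≤ kv.2 then acc ++ [kv.1] else acc) []
    -- cipher[i] can raise IndexError in Python; Pre_ guarantees the index is in range
    let pos := (PySem.List.pyRange 0 (msgL.length : Int) 1).foldl
      (fun d i =>
        let d1 := d.modify (PySem.List.pyGetD msgL i ' ') [] (· ++ [i])
        if PySem.List.pyGetD cipL i ' ' != PySem.List.pyGetD msgL i ' '
        then d1.modify (PySem.List.pyGetD cipL i ' ') [] (· ++ [i]) else d1)
      (PySem.Dict.empty : PySem.Dict Char (List Int))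
    (outputlist.foldl (fun st output =>
      (pos.getD output []).foldl (fun st2 i =>
        if !(PySem.Set.contains st2.1 i) then (PySem.Set.add st2.1 i, st2.2 ++ [i]) else st2) st)
      ((PySem.Set.empty : PySem.Set Int), ([] : List Int))).2

-- ===== PRECONDITION & SPEC =====
-- Pre_ excludes the inputs where Python A raises: both strings empty (max() ValueError) and
-- message longer than cipher (cipher[i] IndexError in phase 2); the length condition also
-- excludes rare inputs where a shorter cipher happens never to be indexed and A returns.
def Pre_freq (message : String) (cipher : String) : Prop :=
  message.toList ++ cipher.toList ≠ [] ∧ message.toList.length ≤ cipher.toList.length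
instance (message : String) (cipher : String) : Decidable (Pre_freq message cipher) := by
  unfold Pre_freq; infer_instance

def pvWitness_freq : String × String := ("ab", "cb")

def Spec_freq (message : String) (cipher : String) (out : List Int) : Prop := out = freq_alt message cipher
instance (message : String) (cipher : String) (out : List Int) : Decidable (Spec_freq message cipher out) := by unfold Spec_freq; infer_instance

-- ===== CLAIM (what is proved, stated in full; the proofs are below) =====
def Claim_equal_freq : Prop := ∀ (message : String) (cipher : String), Dom_freq message cipher → Pre_freq message cipher → Spec_freq message cipher (freq message cipher)

-- ===== LEMMAS AND PROOFS =====

-- A's counting loop (with the membership test) is the plain counter fold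
lemma count_fold_eq (s : List Char) :
    s.foldl (fun d c => if d.contains c then d.insert c (d.getD c 0 + 1) else d.insert c 1)
      (PySem.Dict.empty : PySem.Dict Char Int)
    = PySem.Dict.counter s := by
  rw [← PySem.Dict.foldl_insert_getD_add_one_eq_counter]
  apply PySem.List.foldl_congr_mem
  intro d c _
  by_cases h : d.contains c = true
  · simp [h]
  · rw [PySem.Dict.getD_of_not_contains (h := by simpa using h)]
    simp [h]

lemma values_pos (s : List Char) : ∀ v ∈ (PySem.Dict.counter s).values, 1 ≤ v := by
  intro v hv
  simp [PySem.Dict.values, PySem.Dict.items_counter, PySem.Set.mem_ofList] at hv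
  obtain ⟨k, hk, rfl⟩ := hv
  have : 0 < s.count k := List.count_pos_iff.mpr hk
  omega

-- ---------- generic helper lemmas ----------

lemma flatMap_congr_mem {α β : Type} (L : List α) (f g : α → List β)
    (h : ∀ v ∈ L, f v = g v) : L.flatMap f = L.flatMap g := by
  induction L with
  | nil => rfl
  | cons a t ih =>
    simp only [List.flatMap_cons, h a (by simp), ih (fun v hv => h v (by simp [hv]))]

lemma filter_le_append_filter_gt (k : Int) (l : List Int) (hp : l.Pairwise (· < ·)) :
    l.filter (fun v => decide (v ≤ k)) ++ l.filter (fun v => decide (k < v)) = l := by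
  induction l with
  | nil => rfl
  | cons a t ih =>
    rcases List.pairwise_cons.mp hp with ⟨ha, ht⟩
    by_cases h : a ≤ k
    · simp only [List.filter_cons, decide_eq_true h, if_pos, List.cons_append]
      have : ¬ k < a := not_lt.mpr h
      simp only [decide_eq_false this]
      simpa using ih ht
    · have hka : k < a := not_le.mp h
      have h1 : t.filter (fun v => decide (v ≤ k)) = [] := by
        apply List.filter_eq_nil_iff.mpr
        intro v hv
        simpa using not_le.mpr (lt_trans hka (ha v hv))
      have h2 : t.filter (fun v => decide (k < v)) = t := by
        apply List.filter_eq_self.mpr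
        intro v hv
        simpa using lt_trans hka (ha v hv)
      simp [h, hka, h1, h2]

lemma insertBy_append_left {α : Type} (before : α → α → Bool) (x : α) (A B : List α)
    (h : ∀ a ∈ A, before x a = false) :
    PySem.List.insertBy before x (A ++ B) = A ++ PySem.List.insertBy before x B := by
  induction A with
  | nil => rfl
  | cons a t ih =>
    simp only [List.cons_append, PySem.List.insertBy, h a (by simp), Bool.false_eq_true,
      if_false]
    exact congrArg (a :: ·) (ih (fun b hb => h b (by simp [hb])))

lemma insertBy_all_before {α : Type} (before : α → α → Bool) (x : α) (B : List α)
    (h : ∀ b ∈ B, before x b = true) :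
    PySem.List.insertBy before x B = x :: B := by
  cases B with
  | nil => rfl
  | cons b t => simp [PySem.List.insertBy, h b (by simp)]

lemma pairwise_lt_last (k : Int) (l : List Int) (hp : l.Pairwise (· < ·)) (hk : k ∈ l)
    (hle : ∀ a ∈ l, a ≤ k) : ∃ l', l = l' ++ [k] ∧ ∀ a ∈ l', a < k := by
  induction l with
  | nil => cases hk
  | cons a t ih =>
    rcases List.pairwise_cons.mp hp with ⟨ha, ht⟩
    cases t with
    | nil =>
      have hk' : k = a := by simpa using hk
      exact ⟨[], by simp [hk'], by simp⟩
    | cons b t' =>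
      have hkt : k ∈ b :: t' := by
        rcases List.mem_cons.mp hk with hk | hk
        · exfalso
          have := ha b (by simp)
          have := hle b (by simp)
          omega
        · exact hk
      obtain ⟨l', hl', hlt⟩ := ih ht hkt (fun v hv => hle v (by simp [List.mem_cons.mp hv]))
      refine ⟨a :: l', by simp [hl'], ?_⟩
      intro v hv
      rcases List.mem_cons.mp hv with rfl | hv
      · exact lt_of_lt_of_le (ha b (by simp)) (by
          have : b ∈ l' ++ [k] := by rw [← hl']; simp
          rcases List.mem_append.mp this with hb | hb
          · exact le_of_lt (hlt b hb)
          · simp at hb; omega)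
      · exact hlt v hv

lemma eq_of_pairwise_lt_of_mem_iff (l₁ l₂ : List Int) (h₁ : l₁.Pairwise (· < ·))
    (h₂ : l₂.Pairwise (· < ·)) (h : ∀ v, v ∈ l₁ ↔ v ∈ l₂) : l₁ = l₂ := by
  induction l₁ generalizing l₂ with
  | nil =>
    cases l₂ with
    | nil => rfl
    | cons b t₂ => exact absurd ((h b).mpr (by simp)) (by simp)
  | cons a t₁ ih =>
    cases l₂ with
    | nil => exact absurd ((h a).mp (by simp)) (by simp)
    | cons b t₂ =>
      rcases List.pairwise_cons.mp h₁ with ⟨ha, ht₁⟩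
      rcases List.pairwise_cons.mp h₂ with ⟨hb, ht₂⟩
      have hab : a = b := by
        rcases List.mem_cons.mp ((h a).mp (by simp)) with h' | h'
        · exact h'
        · rcases List.mem_cons.mp ((h b).mpr (by simp)) with h'' | h''
          · exact h''.symm
          · have := ha b h''
            have := hb a h'
            omega
      subst hab
      congr 1
      apply ih t₂ ht₁ ht₂
      intro v
      constructor
      · intro hv
        have hne : v ≠ a := fun he => by have := ha v hv; omega
        rcases List.mem_cons.mp ((h v).mp (by simp [hv])) with h' | h'
        · exact absurd h' hne
        · exact h'
      · intro hv
        have hne : v ≠ a := fun he => by have := hb v hv; omega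
        rcases List.mem_cons.mp ((h v).mpr (by simp [hv])) with h' | h'
        · exact absurd h' hne
        · exact h'

lemma flatMap_filter_of_nil {β : Type} (L : List Int) (p : Int → Bool) (g : Int → List β)
    (h : ∀ v ∈ L, p v = false → g v = []) : (L.filter p).flatMap g = L.flatMap g := by
  induction L with
  | nil => rfl
  | cons a t ih =>
    have iht := ih (fun v hv => h v (by simp [hv]))
    by_cases hp : p a = true
    · simp [hp, iht]
    · simp only [Bool.not_eq_true] at hp
      simp [hp, iht, h a (by simp) hp]

-- ---------- stability of the sort: stable sort = concatenation of key groups ----------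

-- Python's stable sort by an Int key is the concatenation, over the ascending distinct
-- key values, of the groups of elements with that key, each in original order.
lemma stable_sorted_groups {α : Type} (l : List α) (key : α → Int) :
    PySem.List.sorted l key false
    = (PySem.List.sorted (PySem.Set.ofList (l.map key)) (fun v => v) false).flatMap
        (fun v => l.filter (fun x => key x == v)) := by
  induction l using List.reverseRecOn with
  | nil => rfl
  | append_singleton l x ih =>
    have hLHS : PySem.List.sorted (l ++ [x]) key false
        = PySem.List.insertBy (fun a b => decide (key a < key b)) x
            (PySem.List.sorted l key false) := by
      rw [PySem.List.sorted_eq_foldl_insertBy, PySem.List.sorted_eq_foldl_insertBy,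
        List.foldl_append, List.foldl_cons, List.foldl_nil]
    set S : List Int := PySem.Set.ofList (l.map key) with hS
    set V : List Int := PySem.List.sorted S (fun v => v) false with hVdef
    have hV : V.Pairwise (· < ·) := PySem.List.sorted_ofList_pairwise_lt _
    have hVS : V.Perm S := PySem.List.sorted_perm _ _ _
    set k : Int := key x with hk
    set Vlo : List Int := V.filter (fun v => decide (v ≤ k)) with hVlo
    set Vhi : List Int := V.filter (fun v => decide (k < v)) with hVhi
    have hsplit : Vlo ++ Vhi = V := filter_le_append_filter_gt k V hV
    set G : Int → List α := fun v => l.filter (fun y => key y == v) with hG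
    have hGkey : ∀ v, ∀ y ∈ G v, key y = v := by
      intro v y hy
      have := (List.mem_filter.mp hy).2
      exact beq_iff_eq.mp this
    -- step 1: inserting x into the grouped sorted list lands between Vlo's and Vhi's groups
    have hstep1 : PySem.List.insertBy (fun a b => decide (key a < key b)) x
        (V.flatMap G) = Vlo.flatMap G ++ x :: Vhi.flatMap G := by
      rw [← hsplit, List.flatMap_append]
      rw [insertBy_append_left _ _ _ _ (by
        intro a ha
        obtain ⟨v, hv, hav⟩ := List.mem_flatMap.mp ha
        have hva : key a = v := hGkey v a hav
        have : v ≤ k := by simpa using (List.mem_filter.mp hv).2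
        simp [hva]
        omega)]
      rw [insertBy_all_before _ _ _ (by
        intro b hb
        obtain ⟨v, hv, hbv⟩ := List.mem_flatMap.mp hb
        have hvb : key b = v := hGkey v b hbv
        have : k < v := by simpa using (List.mem_filter.mp hv).2
        simp [hvb]
        omega)]
    have hmapk : (l ++ [x]).map key = l.map key ++ [k] := by simp [hk]
    have hofL : PySem.Set.ofList ((l ++ [x]).map key) = PySem.Set.add S k := by
      rw [hmapk, PySem.Set.ofList_eq_foldl, List.foldl_append, List.foldl_cons, List.foldl_nil,
        ← PySem.Set.ofList_eq_foldl, ← hS]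
    have hGapp : ∀ v : Int, (l ++ [x]).filter (fun y => key y == v)
        = G v ++ (if (k == v : Bool) then [x] else []) := by
      intro v
      rw [List.filter_append]
      congr 1
      simp [List.filter_cons, ← hk]
    rw [hLHS, ih, hstep1, hofL]
    by_cases hkS : k ∈ S
    · -- the key already occurs: the distinct-value list is unchanged, x joins its group's end
      have hadd : PySem.Set.add S k = S := by simp [PySem.Set.add, hkS]
      rw [hadd, ← hVdef]
      have hkV : k ∈ V := hVS.mem_iff.mpr hkS
      have hkVlo : k ∈ Vlo := List.mem_filter.mpr ⟨hkV, by simp⟩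
      obtain ⟨Vlo', hVlo', hlt⟩ := pairwise_lt_last k Vlo (hV.filter _) hkVlo
        (fun a ha => by simpa using (List.mem_filter.mp ha).2)
      have hhi : List.flatMap (fun v => (l ++ [x]).filter (fun y => key y == v)) Vhi
          = List.flatMap G Vhi := flatMap_congr_mem Vhi _ G (by
        intro v hv
        have hkv : k < v := by simpa using (List.mem_filter.mp hv).2
        rw [hGapp v]
        have : (k == v) = false := by simp; omega
        simp [this])
      have hlo : List.flatMap (fun v => (l ++ [x]).filter (fun y => key y == v)) Vlo
          = List.flatMap G Vlo' ++ (G k ++ [x]) := by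
        rw [hVlo', List.flatMap_append]
        rw [flatMap_congr_mem Vlo' _ G (by
          intro v hv
          have hkv : v < k := hlt v hv
          rw [hGapp v]
          have : (k == v) = false := by simp; omega
          simp [this])]
        congr 1
        simp only [List.flatMap_cons, List.flatMap_nil, List.append_nil, hGapp k]
        simp
      rw [← hsplit, List.flatMap_append, hhi, hlo, hVlo', List.flatMap_append]
      simp only [List.flatMap_cons, List.flatMap_nil, List.append_nil, List.append_assoc,
        List.cons_append, List.nil_append]
    · -- a new key value: it is inserted between the smaller and the larger distinct values
      have hadd : PySem.Set.add S k = S ++ [k] := by simp [PySem.Set.add, hkS]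
      rw [hadd]
      have hVlo_lt : ∀ v ∈ Vlo, v < k := by
        intro v hv
        have h1 : v ≤ k := by simpa using (List.mem_filter.mp hv).2
        have h2 : v ∈ S := hVS.mem_iff.mp (List.mem_filter.mp hv).1
        have : v ≠ k := fun he => hkS (he ▸ h2)
        omega
      have hsorted' : PySem.List.sorted (S ++ [k]) (fun v => v) false = Vlo ++ k :: Vhi := by
        apply PySem.List.sorted_eq_of_perm_of_pairwise_lt
        · refine List.perm_middle.trans (List.Perm.trans ?_ (List.perm_append_singleton k S).symm)
          rw [hsplit]
          exact hVS.cons k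
        · rw [List.pairwise_append]
          refine ⟨hV.filter _, ?_, ?_⟩
          · rw [List.pairwise_cons]
            exact ⟨fun v hv => by simpa using (List.mem_filter.mp hv).2, hV.filter _⟩
          · intro a ha b hb
            rcases List.mem_cons.mp hb with rfl | hb
            · exact hVlo_lt a ha
            · exact lt_trans (hVlo_lt a ha) (by simpa using (List.mem_filter.mp hb).2)
      rw [hsorted']
      have hGk : G k = [] := by
        apply List.filter_eq_nil_iff.mpr
        intro y hy h
        exact hkS (by
          rw [hS, PySem.Set.mem_ofList]
          exact (beq_iff_eq.mp h) ▸ List.mem_map_of_mem hy)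
      have hlo2 : List.flatMap (fun v => (l ++ [x]).filter (fun y => key y == v)) Vlo
          = List.flatMap G Vlo := flatMap_congr_mem Vlo _ G (by
        intro v hv
        rw [hGapp v]
        have : (k == v) = false := by
          have := hVlo_lt v hv
          simp
          omega
        simp [this])
      have hhi2 : List.flatMap (fun v => (l ++ [x]).filter (fun y => key y == v)) Vhi
          = List.flatMap G Vhi := flatMap_congr_mem Vhi _ G (by
        intro v hv
        have hkv : k < v := by simpa using (List.mem_filter.mp hv).2
        rw [hGapp v]
        have : (k == v) = false := by simp; omega
        simp [this])
      rw [List.flatMap_append, List.flatMap_cons, hlo2, hhi2, hGapp k, hGk]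
      simp

-- ---------- phase 1 ----------

lemma tier_empty (items : List (Char × Int)) (hpos : ∀ p ∈ items, 1 ≤ p.2) (c : Int) (hc : c ≤ 0) :
    items.filter (fun p => p.2 == c) = [] := by
  rw [List.filter_eq_nil_iff]
  intro p hp
  have := hpos p hp
  simp
  omega

lemma filter_flatMap_comm {α : Type} (L : List Int) (g : Int → List α) (p : α → Bool) :
    (L.flatMap g).filter p = L.flatMap (fun v => (g v).filter p) := by
  induction L with
  | nil => rfl
  | cons a t ih => simp [List.filter_append, ih]

lemma flatMap_ite_nil {α : Type} (L : List Int) (p : Int → Bool) (g : Int → List α) :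
    L.flatMap (fun v => if p v then g v else []) = (L.filter p).flatMap g := by
  induction L with
  | nil => rfl
  | cons a t ih =>
    by_cases h : p a = true
    · simp [h, ih]
    · simp only [Bool.not_eq_true] at h
      simp [h, ih]


-- A's guarded tier scans: the guard on each tier may be dropped (the tier is empty anyway)
lemma guard_append (items : List (Char × Int)) (hpos : ∀ p ∈ items, 1 ≤ p.2) (m t : Int)
    (_ht : 1 ≤ t) (prev : List Char) :
    (if m > t then prev ++ (items.filter (fun p => p.2 == m - t)).map Prod.fst else prev)
    = prev ++ (items.filter (fun p => p.2 == m - t)).map Prod.fst := by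
  split_ifs with h
  · rfl
  · rw [tier_empty items hpos (m - t) (by omega), List.map_nil, List.append_nil]

-- B's sort-then-filter produces the same seven tiers
lemma b_phase1 (items : List (Char × Int)) (hpos : ∀ p ∈ items, 1 ≤ p.2) (m : Int)
    (hmax : ∀ p ∈ items, p.2 ≤ m) :
    (PySem.List.sorted items (fun kv => -kv.2) false).foldl
      (fun acc kv => if m - 6 ≤ kv.2 then acc ++ [kv.1] else acc) []
    = ([0, 1, 2, 3, 4, 5, 6] : List Int).flatMap
        (fun t => (items.filter (fun p => p.2 == m - t)).map Prod.fst) := by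
  set S : List Int := PySem.Set.ofList (items.map (fun kv => -kv.2)) with hS
  set G : Int → List (Char × Int) := fun v => items.filter (fun p => (-p.2 == v)) with hG
  have hGneg : ∀ v : Int, G v = items.filter (fun p => p.2 == -v) := by
    intro v
    apply List.filter_congr
    intro p _
    by_cases h : p.2 = -v
    · simp [h]
    · have h' : ¬ (-p.2 = v) := by omega
      simp [h, h']
  have hfold : (PySem.List.sorted items (fun kv => -kv.2) false).foldl
      (fun acc kv => if m - 6 ≤ kv.2 then acc ++ [kv.1] else acc) []
      = ((PySem.List.sorted items (fun kv => -kv.2) false).filter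
          (fun kv => decide (m - 6 ≤ kv.2))).map Prod.fst := by
    exact PySem.List.foldl_append_ite _ _ _ _
  rw [hfold, stable_sorted_groups items (fun kv => -kv.2), filter_flatMap_comm]
  have hgrp : ∀ v ∈ PySem.List.sorted S (fun v => v) false,
      (G v).filter (fun kv => decide (m - 6 ≤ kv.2))
        = if decide (m - 6 ≤ -v) then G v else [] := by
    intro v _
    by_cases h : m - 6 ≤ -v
    · rw [if_pos (by simpa using h)]
      apply List.filter_eq_self.mpr
      intro p hp
      have : p.2 = -v := by
        have := (List.mem_filter.mp hp).2
        have : -p.2 = v := by simpa using this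
        omega
      simp [this, h]
    · rw [if_neg (by simpa using h)]
      apply List.filter_eq_nil_iff.mpr
      intro p hp hle
      have h1 : -p.2 = v := by simpa using (List.mem_filter.mp hp).2
      have h2 : m - 6 ≤ p.2 := by simpa using hle
      omega
  rw [flatMap_congr_mem _ _ _ hgrp, flatMap_ite_nil]
  -- the kept distinct values are exactly the present ones among -m .. 6-m
  have hC : (PySem.List.sorted S (fun v => v) false).filter (fun v => decide (m - 6 ≤ -v))
      = (([0, 1, 2, 3, 4, 5, 6] : List Int).map (fun t => t - m)).filter
          (fun v => decide (v ∈ S)) := by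
    apply eq_of_pairwise_lt_of_mem_iff
    · exact (PySem.List.sorted_ofList_pairwise_lt _).filter _
    · apply List.Pairwise.filter
      rw [List.pairwise_map]
      refine List.Pairwise.imp ?_ (by decide : ([0,1,2,3,4,5,6] : List Int).Pairwise (· < ·))
      intro a b h
      omega
    · intro v
      simp only [List.mem_filter, PySem.List.mem_sorted, List.mem_map, decide_eq_true_eq]
      constructor
      · rintro ⟨hvS, hv6⟩
        refine ⟨⟨v + m, ?_, by ring⟩, hvS⟩
        have : ∃ p ∈ items, -p.2 = v := by
          have := (PySem.Set.mem_ofList _ _).mp hvS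
          simpa using this
        obtain ⟨p, hp, hpv⟩ := this
        have := hmax p hp
        have := hpos p hp
        simp
        omega
      · rintro ⟨⟨t, ht, rfl⟩, hvS⟩
        refine ⟨hvS, ?_⟩
        simp at ht
        omega
  rw [hC, flatMap_filter_of_nil _ _ _ (by
    intro v _ hv
    apply List.filter_eq_nil_iff.mpr
    intro p hp h
    have : v ∈ S := by
      rw [hS, PySem.Set.mem_ofList]
      exact (beq_iff_eq.mp h) ▸ List.mem_map_of_mem hp
    simp [this] at hv)]
  rw [List.flatMap_map, List.map_flatMap]
  apply flatMap_congr_mem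
  intro t _
  show ((G (t - m)).map Prod.fst) = _
  rw [hGneg (t - m), show -(t - m) = m - t by ring]

-- ---------- phase 2 ----------

-- the inverted index holds, for each char, the ascending matching positions
lemma pos_getD (msgL cipL : List Char) (o : Char) :
    (((PySem.List.pyRange 0 (msgL.length : Int) 1).foldl
      (fun d i =>
        let d1 := d.modify (PySem.List.pyGetD msgL i ' ') [] (· ++ [i])
        if PySem.List.pyGetD cipL i ' ' != PySem.List.pyGetD msgL i ' '
        then d1.modify (PySem.List.pyGetD cipL i ' ') [] (· ++ [i]) else d1)
      (PySem.Dict.empty : PySem.Dict Char (List Int))).getD o [])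
    = (PySem.List.pyRange 0 (msgL.length : Int) 1).filter
        (fun i => (PySem.List.pyGetD msgL i ' ' == o) || (PySem.List.pyGetD cipL i ' ' == o)) := by
  have hfold : ∀ (idxs : List Int) (d : PySem.Dict Char (List Int)),
      idxs.foldl (fun d i =>
        let d1 := d.modify (PySem.List.pyGetD msgL i ' ') [] (· ++ [i])
        if PySem.List.pyGetD cipL i ' ' != PySem.List.pyGetD msgL i ' '
        then d1.modify (PySem.List.pyGetD cipL i ' ') [] (· ++ [i]) else d1) d
      = (idxs.flatMap (fun i => (PySem.List.pyGetD msgL i ' ', i) ::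
          (if PySem.List.pyGetD cipL i ' ' != PySem.List.pyGetD msgL i ' '
           then [(PySem.List.pyGetD cipL i ' ', i)] else []))).foldl
          (fun d p => d.modify p.1 [] (· ++ [p.2])) d := by
    intro idxs
    induction idxs with
    | nil => intro d; rfl
    | cons i t ih =>
      intro d
      rw [List.foldl_cons, List.flatMap_cons, List.foldl_append, List.foldl_cons]
      by_cases h : (PySem.List.pyGetD cipL i ' ' != PySem.List.pyGetD msgL i ' ') = true
      · simp only [h, if_true, List.foldl_cons, List.foldl_nil]
        exact ih _
      · simp only [Bool.not_eq_true] at h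
        simp only [h, Bool.false_eq_true, if_false, List.foldl_nil]
        exact ih _
  rw [hfold, PySem.Dict.getD_foldl_modify_append]
  have hempty : (PySem.Dict.empty : PySem.Dict Char (List Int)).getD o [] = [] := by rfl
  rw [hempty, List.nil_append]
  generalize PySem.List.pyRange 0 (msgL.length : Int) 1 = idxs
  induction idxs with
  | nil => rfl
  | cons i t ih =>
    rw [List.flatMap_cons, List.filter_append, List.map_append, ih, List.filter_cons]
    by_cases hm : PySem.List.pyGetD msgL i ' ' = o
    · by_cases hc : PySem.List.pyGetD cipL i ' ' = o
      · simp [hm, hc]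
      · by_cases hcm : (PySem.List.pyGetD cipL i ' ' != PySem.List.pyGetD msgL i ' ') = true
        · simp [hm, hc]
        · simp only [Bool.not_eq_true] at hcm
          simp [hm, hc]
    · by_cases hc : PySem.List.pyGetD cipL i ' ' = o
      · simp [hm, hc]
        rw [if_neg (fun he => hm he.symm)]
        simp
      · by_cases hcm : (PySem.List.pyGetD cipL i ' ' != PySem.List.pyGetD msgL i ' ') = true
        · simp [hcm, hm, hc]
        · simp only [Bool.not_eq_true] at hcm
          simp [hcm, hm, hc]

-- A's inner two-branch dedup loop over all indices = dedup loop over the matching indices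
lemma a_inner_filter (msgL cipL : List Char) (o : Char) (acc : List Int) :
    (PySem.List.pyRange 0 (msgL.length : Int) 1).foldl (fun acc2 i =>
        if (PySem.List.pyGetD msgL i ' ' == o) && !(acc2.contains i) then acc2 ++ [i]
        else if (PySem.List.pyGetD cipL i ' ' == o) && !(acc2.contains i) then acc2 ++ [i]
        else acc2) acc
    = ((PySem.List.pyRange 0 (msgL.length : Int) 1).filter
        (fun i => (PySem.List.pyGetD msgL i ' ' == o) || (PySem.List.pyGetD cipL i ' ' == o))).foldl
        (fun acc2 i => if !(acc2.contains i) then acc2 ++ [i] else acc2) acc := by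
  refine Eq.trans (PySem.List.foldl_congr_mem _ _ _ _ ?_) (PySem.List.foldl_if_eq_foldl_filter _ _ _ _)
  intro acc2 i _
  by_cases hm : (PySem.List.pyGetD msgL i ' ' == o) = true <;>
  by_cases hc : (PySem.List.pyGetD cipL i ' ' == o) = true <;>
    simp [hm, hc]

-- the seen-set dedup fold tracks the list-membership dedup fold
lemma seen_fold_eq (idxs : List Int) : ∀ (seen acc : List Int),
    (∀ x : Int, x ∈ seen ↔ x ∈ acc) →
    (idxs.foldl (fun st2 i =>
        if !(PySem.Set.contains st2.1 i) then (PySem.Set.add st2.1 i, st2.2 ++ [i]) else st2)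
      ((seen : PySem.Set Int), acc)).2
      = idxs.foldl (fun acc2 i => if !(acc2.contains i) then acc2 ++ [i] else acc2) acc
    ∧ (∀ x : Int, x ∈ (idxs.foldl (fun st2 i =>
        if !(PySem.Set.contains st2.1 i) then (PySem.Set.add st2.1 i, st2.2 ++ [i]) else st2)
      ((seen : PySem.Set Int), acc)).1
      ↔ x ∈ idxs.foldl (fun acc2 i => if !(acc2.contains i) then acc2 ++ [i] else acc2) acc) := by
  induction idxs with
  | nil => intro seen acc hinv; exact ⟨rfl, hinv⟩
  | cons i t ih =>
    intro seen acc hinv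
    have hc : PySem.Set.contains seen i = acc.contains i := by
      simp [PySem.Set.contains_eq_listContains, hinv i]
    have hadd : ∀ x : Int, x ∈ PySem.Set.add seen i ↔ x ∈ acc ++ [i] := by
      intro x
      simp [PySem.Set.mem_add, hinv x]
    simp only [List.foldl_cons]
    cases hmem : acc.contains i <;>
      simp only [hc, hmem, Bool.not_true, Bool.not_false, if_true, if_false,
        Bool.false_eq_true] <;>
      first
      | exact ih seen acc hinv
      | exact ih _ _ hadd

-- the two whole positional phases agree
lemma phase2_eq (msgL cipL : List Char) (outs : List Char) :
    (outs.foldl (fun st output =>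
        (((PySem.List.pyRange 0 (msgL.length : Int) 1).foldl
          (fun d i =>
            let d1 := d.modify (PySem.List.pyGetD msgL i ' ') [] (· ++ [i])
            if PySem.List.pyGetD cipL i ' ' != PySem.List.pyGetD msgL i ' '
            then d1.modify (PySem.List.pyGetD cipL i ' ') [] (· ++ [i]) else d1)
          (PySem.Dict.empty : PySem.Dict Char (List Int))).getD output []).foldl
          (fun st2 i =>
            if !(PySem.Set.contains st2.1 i) then (PySem.Set.add st2.1 i, st2.2 ++ [i]) else st2) st)
      ((PySem.Set.empty : PySem.Set Int), ([] : List Int))).2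
    = outs.foldl (fun acc output =>
        (PySem.List.pyRange 0 (msgL.length : Int) 1).foldl (fun acc2 i =>
          if (PySem.List.pyGetD msgL i ' ' == output) && !(acc2.contains i) then acc2 ++ [i]
          else if (PySem.List.pyGetD cipL i ' ' == output) && !(acc2.contains i) then acc2 ++ [i]
          else acc2) acc) [] := by
  suffices h : ∀ (outs : List Char) (seen acc : List Int), (∀ x : Int, x ∈ seen ↔ x ∈ acc) →
      (outs.foldl (fun st output =>
        (((PySem.List.pyRange 0 (msgL.length : Int) 1).foldl
          (fun d i =>
            let d1 := d.modify (PySem.List.pyGetD msgL i ' ') [] (· ++ [i])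
            if PySem.List.pyGetD cipL i ' ' != PySem.List.pyGetD msgL i ' '
            then d1.modify (PySem.List.pyGetD cipL i ' ') [] (· ++ [i]) else d1)
          (PySem.Dict.empty : PySem.Dict Char (List Int))).getD output []).foldl
          (fun st2 i =>
            if !(PySem.Set.contains st2.1 i) then (PySem.Set.add st2.1 i, st2.2 ++ [i]) else st2) st)
      ((seen : PySem.Set Int), acc)).2
      = outs.foldl (fun acc output =>
          (PySem.List.pyRange 0 (msgL.length : Int) 1).foldl (fun acc2 i =>
            if (PySem.List.pyGetD msgL i ' ' == output) && !(acc2.contains i) then acc2 ++ [i]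
            else if (PySem.List.pyGetD cipL i ' ' == output) && !(acc2.contains i) then acc2 ++ [i]
            else acc2) acc) acc by
    exact h outs [] [] (by simp)
  intro outs
  induction outs with
  | nil => intro seen acc hinv; rfl
  | cons o rest ih =>
    intro seen acc hinv
    simp only [List.foldl_cons]
    rw [pos_getD msgL cipL o, a_inner_filter msgL cipL o acc]
    obtain ⟨h1, h2⟩ := seen_fold_eq
      ((PySem.List.pyRange 0 (msgL.length : Int) 1).filter
        (fun i => (PySem.List.pyGetD msgL i ' ' == o) || (PySem.List.pyGetD cipL i ' ' == o)))
      seen acc hinv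
    have hpair : (((PySem.List.pyRange 0 (msgL.length : Int) 1).filter
        (fun i => (PySem.List.pyGetD msgL i ' ' == o) || (PySem.List.pyGetD cipL i ' ' == o))).foldl
        (fun st2 i =>
          if !(PySem.Set.contains st2.1 i) then (PySem.Set.add st2.1 i, st2.2 ++ [i]) else st2)
        ((seen : PySem.Set Int), acc))
      = ((((PySem.List.pyRange 0 (msgL.length : Int) 1).filter
        (fun i => (PySem.List.pyGetD msgL i ' ' == o) || (PySem.List.pyGetD cipL i ' ' == o))).foldl
        (fun st2 i =>
          if !(PySem.Set.contains st2.1 i) then (PySem.Set.add st2.1 i, st2.2 ++ [i]) else st2)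
        ((seen : PySem.Set Int), acc)).1,
        ((PySem.List.pyRange 0 (msgL.length : Int) 1).filter
          (fun i => (PySem.List.pyGetD msgL i ' ' == o) || (PySem.List.pyGetD cipL i ' ' == o))).foldl
          (fun acc2 i => if !(acc2.contains i) then acc2 ++ [i] else acc2) acc) := by
      rw [← h1]
    rw [hpair]
    exact ih _ _ (by simpa using h2)

theorem main_eq (message cipher : String) : freq message cipher = freq_alt message cipher := by
  simp only [freq, freq_alt, count_fold_eq, PySem.Dict.foldl_insert_getD_add_one_eq_counter]
  cases h : PySem.List.max? (PySem.Dict.counter (message.toList ++ cipher.toList)).values (fun v => v) with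
  | none => rfl
  | some m =>
    have hpos : ∀ p ∈ (PySem.Dict.counter (message.toList ++ cipher.toList)).items, 1 ≤ p.2 := by
      intro p hp
      exact values_pos _ p.2 (by simp only [PySem.Dict.values]; exact List.mem_map_of_mem hp)
    have hmax : ∀ p ∈ (PySem.Dict.counter (message.toList ++ cipher.toList)).items, p.2 ≤ m := by
      intro p hp
      exact PySem.List.max?_isMax h p.2
        (by simp only [PySem.Dict.values]; exact List.mem_map_of_mem hp)
    simp only [PySem.List.foldl_append_if]
    rw [guard_append _ hpos m 1 (by norm_num), guard_append _ hpos m 2 (by norm_num),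
        guard_append _ hpos m 3 (by norm_num), guard_append _ hpos m 4 (by norm_num),
        guard_append _ hpos m 5 (by norm_num), guard_append _ hpos m 6 (by norm_num)]
    rw [b_phase1 _ hpos m hmax, phase2_eq]
    simp [List.flatMap_cons, List.append_assoc]

-- ===== VERDICT (by name: the statement is the Claim_ definition above) =====
theorem freq_spec : Claim_equal_freq := by
  intro message cipher _ _
  unfold Spec_freq
  exact main_eq message cipher
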